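-- pv_equiv track=rewrite | github.com/SadiqueCodes/Ruju | format_ayahs.py | juz_number_for
-- ===== SOURCE A (Python) =====
-- JUZ_STARTS = [
--     (1, 1), (2, 142), (2, 253), (3, 93), (4, 24), (4, 148), (5, 82), (6, 111), (7, 88), (8, 41),
--     (9, 93), (11, 6), (12, 53), (15, 1), (17, 1), (18, 75), (21, 1), (23, 1), (25, 21), (27, 56),
--     (29, 46), (33, 31), (36, 28), (39, 32), (41, 47), (46, 1), (51, 31), (58, 1), (67, 1), (78, 1),
-- ]
--
-- def juz_number_for(surah, ayah):
--     if not isinstance(surah, int) or not isinstance(ayah, int):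
--         return None
--     current = 1
--     for i, (s, a) in enumerate(JUZ_STARTS, start=1):
--         if (surah, ayah) >= (s, a):
--             current = i
--         else:
--             break
--     return current
-- ===== SOURCE B (Python) =====
-- # Binary search over a flat alternating (surah, ayah) table instead of a
-- # linear break-scan over a list of tuples.
-- _JUZ_FLAT = [
--     1, 1, 2, 142, 2, 253, 3, 93, 4, 24, 4, 148, 5, 82, 6, 111, 7, 88, 8, 41,
--     9, 93, 11, 6, 12, 53, 15, 1, 17, 1, 18, 75, 21, 1, 23, 1, 25, 21, 27, 56,
--     29, 46, 33, 31, 36, 28, 39, 32, 41, 47, 46, 1, 51, 31, 58, 1, 67, 1, 78, 1,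
-- ]
--
-- def juz_number_for(surah, ayah):
--     if not isinstance(surah, int) or not isinstance(ayah, int):
--         return None
--     lo, hi = 0, 30
--     while lo < hi:
--         mid = (lo + hi) // 2
--         s = _JUZ_FLAT[2 * mid]
--         a = _JUZ_FLAT[2 * mid + 1]
--         if s < surah or (s == surah and a <= ayah):
--             lo = mid + 1
--         else:
--             hi = mid
--     return lo if lo > 0 else 1
-- ===== Notes on version B (the rewrite author's own statement) =====
-- stated objective: alternative
-- what changed: Replaced A's linear break-scan over a list of (surah, ayah) tuples with a binary search over a flat alternating int array with an inline lexicographic comparison; the result is the count of juz starts <= (surah, ayah), clamped to 1.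
import Mathlib
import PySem

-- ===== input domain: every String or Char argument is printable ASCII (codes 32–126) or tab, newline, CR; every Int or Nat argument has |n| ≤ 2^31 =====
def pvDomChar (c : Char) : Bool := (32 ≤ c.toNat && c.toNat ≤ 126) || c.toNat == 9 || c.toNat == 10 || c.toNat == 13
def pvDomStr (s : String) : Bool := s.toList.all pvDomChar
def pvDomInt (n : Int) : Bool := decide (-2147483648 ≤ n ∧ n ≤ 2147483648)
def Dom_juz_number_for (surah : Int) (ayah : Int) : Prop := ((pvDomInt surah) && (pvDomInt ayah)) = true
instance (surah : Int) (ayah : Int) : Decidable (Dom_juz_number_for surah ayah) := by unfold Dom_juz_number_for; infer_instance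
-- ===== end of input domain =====

-- B replaces A's linear break-scan over tuple pairs with a binary search over a flat
-- alternating surah/ayah array; same return value everywhere.
-- (Both ports take Int arguments, so A's isinstance guard is always satisfied and never returns None.)

-- ===== PORT A =====
def JUZ_STARTS : List (Int × Int) := [
    (1, 1), (2, 142), (2, 253), (3, 93), (4, 24), (4, 148), (5, 82), (6, 111), (7, 88), (8, 41),
    (9, 93), (11, 6), (12, 53), (15, 1), (17, 1), (18, 75), (21, 1), (23, 1), (25, 21), (27, 56),
    (29, 46), (33, 31), (36, 28), (39, 32), (41, 47), (46, 1), (51, 31), (58, 1), (67, 1), (78, 1)]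

-- Python tuple order on int pairs: p <= t  (lexicographic); exact.
def pairLe (p t : Int × Int) : Bool := decide (p.1 < t.1 ∨ (p.1 = t.1 ∧ p.2 ≤ t.2))

-- A's for-loop with break: current := i while (surah, ayah) >= (s, a), else break
def loopA (t : Int × Int) : List (Int × Int) → Int → Int → Int
  | [], _, current => current
  | p :: rest, i, current => if pairLe p t then loopA t rest (i + 1) i else current

def juz_number_for (surah : Int) (ayah : Int) : Option Int :=
  some (loopA (surah, ayah) JUZ_STARTS 1 1)

-- ===== PORT B =====
-- Source B's flat table: entries 2*i and 2*i+1 are the surah and ayah of the i-th juz start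
def JUZ_FLAT : List Int := [
    1, 1, 2, 142, 2, 253, 3, 93, 4, 24, 4, 148, 5, 82, 6, 111, 7, 88, 8, 41,
    9, 93, 11, 6, 12, 53, 15, 1, 17, 1, 18, 75, 21, 1, 23, 1, 25, 21, 27, 56,
    29, 46, 33, 31, 36, 28, 39, 32, 41, 47, 46, 1, 51, 31, 58, 1, 67, 1, 78, 1]

-- Source B's while loop, with fuel = initial hi - lo (enough since hi - lo decreases each turn)
def searchCut (surah ayah : Int) : Nat → Nat → Nat → Nat
  | 0, lo, _hi => lo
  | fuel + 1, lo, hi =>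
    if lo < hi then
      let mid := (lo + hi) / 2
      let s := JUZ_FLAT.getD (2 * mid) 0
      let a := JUZ_FLAT.getD (2 * mid + 1) 0
      if s < surah ∨ (s = surah ∧ a ≤ ayah) then searchCut surah ayah fuel (mid + 1) hi
      else searchCut surah ayah fuel lo mid
    else lo

def juz_number_for_alt (surah : Int) (ayah : Int) : Option Int :=
  let lo := searchCut surah ayah 30 0 30
  some (if lo > 0 then (lo : Int) else 1)

-- ===== PRECONDITION & SPEC =====
def Spec_juz_number_for (surah : Int) (ayah : Int) (out : Option Int) : Prop := out = juz_number_for_alt surah ayah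
instance (surah : Int) (ayah : Int) (out : Option Int) : Decidable (Spec_juz_number_for surah ayah out) := by unfold Spec_juz_number_for; infer_instance

-- ===== CLAIM (what is proved, stated in full; the proofs are below) =====
def Claim_equal_juz_number_for : Prop := ∀ (surah : Int) (ayah : Int), Dom_juz_number_for surah ayah → Spec_juz_number_for surah ayah (juz_number_for surah ayah)

-- ===== LEMMAS AND PROOFS =====

-- lexicographic ≤ is transitive
theorem pairLe_trans {p q t : Int × Int} (h1 : pairLe p q = true) (h2 : pairLe q t = true) :
    pairLe p t = true := by
  simp only [pairLe, decide_eq_true_eq] at *; omega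

-- JUZ_STARTS is sorted in Python tuple order
theorem juz_pairwise : List.Pairwise (fun p q => pairLe p q = true) JUZ_STARTS := by decide

-- B's flat table holds exactly the pairs of A's table
theorem flat_bridge : ∀ i : Fin 30,
    (JUZ_FLAT.getD (2 * i.1) 0, JUZ_FLAT.getD (2 * i.1 + 1) 0) = JUZ_STARTS.getD i.1 (0, 0) := by
  decide

-- along a sorted list, the set of elements ≤ t is a prefix: it has a cut index k
theorem exists_prefix {α : Type} (c : α → Bool) :
    ∀ (l : List α), List.Pairwise (fun p q => c q = true → c p = true) l →
    ∃ k, k ≤ l.length ∧ ∀ i (h : i < l.length), (c l[i] = true ↔ i < k) := by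
  intro l
  induction l with
  | nil => exact fun _ => ⟨0, by simp⟩
  | cons p rest ih =>
    intro hpw
    obtain ⟨k, hk, hiff⟩ := ih (List.pairwise_cons.mp hpw).2
    by_cases hp : c p = true
    · refine ⟨k + 1, by simpa using hk, fun i h => ?_⟩
      cases i with
      | zero => simpa using hp
      | succ j => simpa using (hiff j (by simpa using h)).trans (by omega)
    · refine ⟨0, by simp, fun i h => ?_⟩
      cases i with
      | zero => simpa using hp
      | succ j =>
        simp only [List.getElem_cons_succ, Nat.not_lt_zero, iff_false]
        intro hc
        exact hp ((List.pairwise_cons.mp hpw).1 (rest[j]'(by simpa using h)) (List.getElem_mem _) hc)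

-- A's loop on a prefix-cut atom list returns i + k - 1, or current when k = 0
theorem loopA_prefix (t : Int × Int) :
    ∀ (l : List (Int × Int)) (k : Nat) (i cur : Int),
    (∀ j (h : j < l.length), (pairLe l[j] t = true ↔ j < k)) → k ≤ l.length →
    loopA t l i cur = if k = 0 then cur else i + k - 1 := by
  intro l
  induction l with
  | nil => intro k i cur _ hk; simp at hk; simp [loopA, hk]
  | cons p rest ih =>
    intro k i cur hiff hk
    have h0 := hiff 0 (by simp)
    simp only [List.getElem_cons_zero] at h0
    cases k with
    | zero =>
      have hp : ¬ pairLe p t = true := by simp [h0]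
      simp [loopA, hp]
    | succ m =>
      have hp : pairLe p t = true := h0.mpr (by omega)
      have hrest : ∀ j (h : j < rest.length), (pairLe rest[j] t = true ↔ j < m) := by
        intro j h
        have := hiff (j + 1) (by simpa using h)
        simpa [Nat.succ_lt_succ_iff] using this
      simp only [loopA, if_pos hp]
      rw [ih m (i + 1) i hrest (by simpa using hk)]
      by_cases hm : m = 0
      · subst hm; simp
      · rw [if_neg hm, if_neg (by omega : ¬ m + 1 = 0)]
        push_cast; ring

-- B's binary search on the flat table finds the cut index k of the pair table
theorem searchCut_prefix (surah ayah : Int) (k : Nat)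
    (hiff : ∀ i (h : i < JUZ_STARTS.length), (pairLe JUZ_STARTS[i] (surah, ayah) = true ↔ i < k)) :
    ∀ n lo hi, hi - lo ≤ n → hi ≤ 30 → lo ≤ k → k ≤ hi →
    searchCut surah ayah n lo hi = k := by
  intro n
  induction n with
  | zero =>
    intro lo hi h1 _ h3 h4
    simp only [searchCut]; omega
  | succ m ih =>
    intro lo hi h1 h2 h3 h4
    rw [searchCut]
    by_cases hlh : lo < hi
    · rw [if_pos hlh]
      have hlen : JUZ_STARTS.length = 30 := by decide
      have hmid : (lo + hi) / 2 < JUZ_STARTS.length := by omega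
      have hbr := flat_bridge ⟨(lo + hi) / 2, by omega⟩
      rw [List.getD_eq_getElem _ _ hmid] at hbr
      have hcond : (JUZ_FLAT.getD (2 * ((lo + hi) / 2)) 0 < surah ∨
          (JUZ_FLAT.getD (2 * ((lo + hi) / 2)) 0 = surah ∧
           JUZ_FLAT.getD (2 * ((lo + hi) / 2) + 1) 0 ≤ ayah)) ↔
          pairLe JUZ_STARTS[(lo + hi) / 2] (surah, ayah) = true := by
        rw [← hbr]
        simp [pairLe]
      by_cases hc : pairLe JUZ_STARTS[(lo + hi) / 2] (surah, ayah) = true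
      · rw [if_pos (hcond.mpr hc)]
        have : (lo + hi) / 2 < k := (hiff _ hmid).mp hc
        exact ih _ _ (by omega) h2 (by omega) h4
      · rw [if_neg (fun h => hc (hcond.mp h))]
        have : ¬ ((lo + hi) / 2 < k) := fun hlt => hc ((hiff _ hmid).mpr hlt)
        exact ih _ _ (by omega) (by omega) h3 (by omega)
    · rw [if_neg hlh]; omega

-- ===== VERDICT (by name: the statement is the Claim_ definition above) =====
theorem juz_number_for_spec : Claim_equal_juz_number_for := by
  intro surah ayah _
  unfold Spec_juz_number_for juz_number_for juz_number_for_alt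
  set t : Int × Int := (surah, ayah) with ht
  have hch : List.Pairwise (fun p q => pairLe q t = true → pairLe p t = true) JUZ_STARTS :=
    juz_pairwise.imp (fun hpq hqt => pairLe_trans hpq hqt)
  obtain ⟨k, hk, hiff⟩ := exists_prefix (fun p => pairLe p t) JUZ_STARTS hch
  rw [loopA_prefix t JUZ_STARTS k 1 1 hiff hk]
  have hlen : JUZ_STARTS.length = 30 := by decide
  rw [show searchCut surah ayah 30 0 30 = k from
      searchCut_prefix surah ayah k (by rw [ht] at hiff; exact hiff) 30 0 30 (by omega) le_rfl
        (by omega) (by omega)]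
  simp only
  by_cases h0 : k = 0
  · subst h0; norm_num
  · rw [if_neg h0, if_pos (by omega : k > 0)]
    congr 1
    omega
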